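-- pv_equiv track=rewrite | github.com/AshwinChandlapur/HuffMan | neater.py | eightbitdivide
-- ===== SOURCE A (Python) =====
-- def eightbitdivide(binaryString):
--     binLen = len(binaryString)
--     extrabits = 0
--     if(binLen %8!=0):
--         extrabits = 8 - (binLen%8)
--         binaryString = extrabits*'0'+binaryString
--     output = [binaryString[i:i + 8] for i in range(0, len(binaryString), 8)]
--     # lastgroupLength = 8 - len(output[len(output)-1])
--     # output[len(output)-1] = "0"*(lastgroupLength) + output[len(output)-1]
--     return output,extrabits
-- ===== SOURCE B (Python) =====
-- def eightbitdivide(binaryString):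
--     r = len(binaryString) % 8
--     if r == 0:
--         out = []
--         rest = binaryString
--         extrabits = 0
--     else:
--         extrabits = 8 - r
--         out = ['0' * extrabits + binaryString[:r]]
--         rest = binaryString[r:]
--     while rest:
--         out.append(rest[:8])
--         rest = rest[8:]
--     return out, extrabits
-- ===== Notes on version B (the rewrite author's own statement) =====
-- stated objective: alternative
-- what changed: B never builds the padded copy of the string: it constructs the first (zero-padded) chunk explicitly from the remainder length and then consumes the rest of the original string 8 characters at a time with a take/drop while-loop, instead of A's index-comprehension over range(0, len, 8) of a freshly allocated padded string.
import Mathlib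
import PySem

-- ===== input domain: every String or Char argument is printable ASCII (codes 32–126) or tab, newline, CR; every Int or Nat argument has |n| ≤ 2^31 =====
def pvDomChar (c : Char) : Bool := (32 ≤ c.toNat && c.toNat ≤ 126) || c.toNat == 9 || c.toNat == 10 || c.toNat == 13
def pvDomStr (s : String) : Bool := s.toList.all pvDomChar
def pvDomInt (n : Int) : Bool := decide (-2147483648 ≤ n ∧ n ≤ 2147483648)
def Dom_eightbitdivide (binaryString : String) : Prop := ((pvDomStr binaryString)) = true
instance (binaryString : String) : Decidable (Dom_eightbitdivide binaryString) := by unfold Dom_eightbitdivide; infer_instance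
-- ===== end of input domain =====

-- B avoids allocating A's padded copy: it builds the zero-padded head chunk directly and
-- consumes the rest of the original string 8 characters at a time (alternative decomposition).

-- ===== PORT A =====
def eightbitdivide (binaryString : String) : List String × Int :=
  let binLen : Int := (binaryString.toList.length : Int)
  -- extrabits = 0; if binLen % 8 != 0: extrabits = 8 - binLen % 8; binaryString = '0'*extrabits + binaryString
  let (s, extrabits) :=
    if PySem.Int.mod binLen 8 ≠ 0 then
      let e := 8 - PySem.Int.mod binLen 8
      (PySem.List.pyRepeat ['0'] e ++ binaryString.toList, e)
    else (binaryString.toList, (0 : Int))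
  -- output = [binaryString[i:i+8] for i in range(0, len(binaryString), 8)]
  ((PySem.List.pyRange 0 (s.length : Int) 8).map
      (fun i => String.ofList (PySem.List.slice s (some i) (some (i + 8)))), extrabits)

-- ===== PORT B =====
-- 'while rest: out.append(rest[:8]); rest = rest[8:]'
def pvChunkLoop (rest : List Char) (out : List String) : List String :=
  if rest.isEmpty then out
  else pvChunkLoop (rest.drop 8) (out ++ [String.ofList (rest.take 8)])
termination_by rest.length
decreasing_by
  cases rest with
  | nil => simp_all
  | cons c cs => simp only [List.length_drop, List.length_cons]; omega

def eightbitdivide_alt (binaryString : String) : List String × Int :=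
  let s := binaryString.toList
  let r := s.length % 8
  let (out, rest, extrabits) :=
    if r = 0 then (([] : List String), s, (0 : Int))
    else ([String.ofList (List.replicate (8 - r) '0' ++ s.take r)], s.drop r, 8 - (r : Int))
  (pvChunkLoop rest out, extrabits)

-- ===== PRECONDITION & SPEC =====
def Spec_eightbitdivide (binaryString : String) (out : List String × Int) : Prop := out = eightbitdivide_alt binaryString
instance (binaryString : String) (out : List String × Int) : Decidable (Spec_eightbitdivide binaryString out) := by unfold Spec_eightbitdivide; infer_instance

-- ===== CLAIM (what is proved, stated in full; the proofs are below) =====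
def Claim_equal_eightbitdivide : Prop := ∀ (binaryString : String), Dom_eightbitdivide binaryString → Spec_eightbitdivide binaryString (eightbitdivide binaryString)

-- ===== LEMMAS AND PROOFS =====

lemma pvChunkLoop_nil (out : List String) : pvChunkLoop [] out = out := by
  rw [pvChunkLoop]; simp

lemma pvChunkLoop_cons (c : Char) (cs : List Char) (out : List String) :
    pvChunkLoop (c :: cs) out =
      pvChunkLoop ((c :: cs).drop 8) (out ++ [String.ofList ((c :: cs).take 8)]) := by
  rw [pvChunkLoop]; simp

-- the loop's accumulator is a pure prefix
lemma pvChunkLoop_acc : ∀ (n : Nat) (l : List Char), l.length ≤ n →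
    ∀ out, pvChunkLoop l out = out ++ pvChunkLoop l [] := by
  intro n
  induction n with
  | zero =>
    intro l hl out
    have : l = [] := List.length_eq_zero_iff.mp (Nat.le_zero.mp hl)
    subst this
    simp [pvChunkLoop_nil]
  | succ n ih =>
    intro l hl out
    cases l with
    | nil => simp [pvChunkLoop_nil]
    | cons c cs =>
      have hlen : ((c :: cs).drop 8).length ≤ n := by
        simp only [List.length_drop, List.length_cons]
        simp only [List.length_cons] at hl
        omega
      rw [pvChunkLoop_cons, pvChunkLoop_cons]
      rw [ih _ hlen (out ++ _), ih _ hlen ([] ++ _)]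
      simp

-- A's range-comprehension chunking, reindexed over Nat, equals B's take/drop loop
lemma chunk_range_eq : ∀ (n : Nat) (l : List Char), l.length ≤ n →
    (List.range ((l.length + 7) / 8)).map
        (fun k => String.ofList ((l.drop (8 * k)).take 8)) = pvChunkLoop l [] := by
  intro n
  induction n with
  | zero =>
    intro l hl
    have : l = [] := List.length_eq_zero_iff.mp (Nat.le_zero.mp hl)
    subst this
    simp [pvChunkLoop_nil]
  | succ n ih =>
    intro l hl
    cases l with
    | nil => simp [pvChunkLoop_nil]
    | cons c cs =>
      have hlen : ((c :: cs).drop 8).length ≤ n := by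
        simp only [List.length_drop, List.length_cons]
        simp only [List.length_cons] at hl
        omega
      have hc : ((c :: cs).length + 7) / 8 = (((c :: cs).drop 8).length + 7) / 8 + 1 := by
        simp only [List.length_cons, List.length_drop]
        omega
      rw [hc, List.range_succ_eq_map, List.map_cons, List.map_map]
      rw [pvChunkLoop_cons]
      rw [pvChunkLoop_acc n ((c :: cs).drop 8) hlen ([] ++ _), ← ih ((c :: cs).drop 8) hlen]
      simp only [List.nil_append, List.singleton_append, Nat.mul_zero, List.drop_zero]
      congr 1
      apply List.map_congr_left
      intro k _
      simp only [Function.comp]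
      simp only [List.drop_drop]
      congr 3
      omega

-- bridge: A's pyRange/slice comprehension is the Nat-indexed comprehension
lemma chunkA_bridge (l : List Char) :
    (PySem.List.pyRange 0 (l.length : Int) 8).map
        (fun i => String.ofList (PySem.List.slice l (some i) (some (i + 8)))) =
    (List.range ((l.length + 7) / 8)).map
        (fun k => String.ofList ((l.drop (8 * k)).take 8)) := by
  rw [PySem.List.pyRange_of_pos 0 (l.length : Int) (by norm_num)]
  have hcount : (if (0 : Int) < (l.length : Int)
      then (((l.length : Int) - 0 + 8 - 1) / 8).toNat else 0) = (l.length + 7) / 8 := by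
    split <;> omega
  rw [hcount, List.map_map]
  apply List.map_congr_left
  intro k _
  simp only [Function.comp, zero_add]
  have h8 : (8 : Int) * (k : Nat) = ((8 * k : Nat) : Int) := by push_cast; ring
  rw [h8, show ((8 * k : Nat) : Int) + 8 = ((8 * k : Nat) : Int) + ((8 : Nat) : Int) by norm_num,
      PySem.List.slice_natCast_add]

lemma chunkA_eq (l : List Char) :
    (PySem.List.pyRange 0 (l.length : Int) 8).map
        (fun i => String.ofList (PySem.List.slice l (some i) (some (i + 8)))) = pvChunkLoop l [] := by
  rw [chunkA_bridge]
  exact chunk_range_eq l.length l (le_refl _)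

lemma mod_natCast_eight (m : Nat) : PySem.Int.mod (m : Int) 8 = ((m % 8 : Nat) : Int) := by
  rw [PySem.Int.mod_eq_emod_of_pos (by norm_num : (0 : Int) < 8)]
  omega

-- ===== VERDICT (by name: the statement is the Claim_ definition above) =====
theorem eightbitdivide_spec : Claim_equal_eightbitdivide := by
  intro binaryString _
  unfold Spec_eightbitdivide eightbitdivide eightbitdivide_alt
  simp only [mod_natCast_eight]
  set l := binaryString.toList with hl
  set r := l.length % 8 with hr
  by_cases h : r = 0
  · rw [if_neg (by simp [h]), if_pos h]
    rw [chunkA_eq]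
  · have hr8 : r < 8 := Nat.mod_lt _ (by norm_num)
    have hrle : r ≤ l.length := Nat.mod_le _ _
    rw [if_pos (Int.natCast_ne_zero.mpr h), if_neg h]
    have hrep : PySem.List.pyRepeat ['0'] (8 - ((r : Nat) : Int)) = List.replicate (8 - r) '0' := by
      rw [PySem.List.pyRepeat_singleton]
      congr 1
      omega
    rw [hrep]
    set p : List Char := List.replicate (8 - r) '0' ++ l with hp
    rw [chunkA_eq]
    have hpne : p ≠ [] := by
      rw [hp]
      simp only [ne_eq, List.append_eq_nil_iff, List.replicate_eq_nil_iff, not_and]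
      intro h1
      omega
    obtain ⟨c, cs, hcc⟩ := List.exists_cons_of_ne_nil hpne
    rw [hcc, pvChunkLoop_cons, ← hcc]
    have htake : p.take 8 = List.replicate (8 - r) '0' ++ l.take r := by
      rw [hp, List.take_append]
      congr 1
      · rw [List.take_replicate]
        congr 1
        omega
      · congr 1
        simp only [List.length_replicate]
        omega
    have hdrop : p.drop 8 = l.drop r := by
      rw [hp, List.drop_append, List.drop_replicate]
      simp only [List.length_replicate, show 8 - r - 8 = 0 from by omega,
        show 8 - (8 - r) = r from by omega, List.replicate_zero, List.nil_append]
    rw [htake, hdrop]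
    simp only [List.nil_append]
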